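-- pv_equiv track=rewrite | github.com/Ionman64/PHANTOM | python/main.py | get_number_of_seconds
-- ===== SOURCE A (Python) =====
-- def get_number_of_seconds(unit):
--     s = 1
--     if unit == "minute":
--         s = 60
--     if unit == "hour":
--         s = get_number_of_seconds("minute")*60
--     if unit == "day":
--         s = get_number_of_seconds("hour")*24
--     if unit == "week":
--         s = get_number_of_seconds("day")*7
--     return s
-- ===== SOURCE B (Python) =====
-- _UNIT_SECONDS = [("minute", 60), ("hour", 3600), ("day", 86400), ("week", 604800)]
--
-- def get_number_of_seconds(unit):
--     for name, seconds in _UNIT_SECONDS: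
--         if unit == name:
--             return seconds
--     return 1
-- ===== Notes on version B (the rewrite author's own statement) =====
-- stated objective: simpler
-- what changed: Replaces A's recursive if-cascade (which recomputes smaller units by recursive calls) with a single pass over a literal (name, seconds) table using == comparisons, defaulting to 1.
import Mathlib
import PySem

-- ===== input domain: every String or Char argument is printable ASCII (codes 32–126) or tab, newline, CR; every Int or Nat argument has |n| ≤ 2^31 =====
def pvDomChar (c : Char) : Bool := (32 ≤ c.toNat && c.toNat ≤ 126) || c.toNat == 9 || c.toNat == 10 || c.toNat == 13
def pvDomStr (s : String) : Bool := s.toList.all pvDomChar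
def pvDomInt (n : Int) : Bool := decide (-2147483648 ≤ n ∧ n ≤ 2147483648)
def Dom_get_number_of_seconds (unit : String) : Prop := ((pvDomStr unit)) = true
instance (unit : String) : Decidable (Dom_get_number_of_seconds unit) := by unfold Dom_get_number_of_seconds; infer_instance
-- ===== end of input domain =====

-- B replaces A's recursive if-cascade with one pass over a literal (name, seconds) table; simpler, same values.
-- ===== PORT A =====
-- rank: termination measure for A's self-recursion (each recursive call is on a strictly smaller unit)
def pvUnitRank (unit : String) : Nat :=
  if unit == "minute" then 1 else if unit == "hour" then 2
  else if unit == "day" then 3 else if unit == "week" then 4 else 0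

def get_number_of_seconds (unit : String) : Int :=
  let s : Int := 1
  let s := if unit == "minute" then 60 else s
  let s := if unit == "hour" then get_number_of_seconds "minute" * 60 else s
  let s := if unit == "day" then get_number_of_seconds "hour" * 24 else s
  let s := if unit == "week" then get_number_of_seconds "day" * 7 else s
  s
termination_by pvUnitRank unit
decreasing_by all_goals (simp_all [pvUnitRank]; try omega)

-- ===== PORT B =====
def pvUnitTable : List (String × Int) :=
  [("minute", 60), ("hour", 3600), ("day", 86400), ("week", 604800)]

def pvLookupUnit (unit : String) : List (String × Int) → Int
  | [] => 1
  | (name, seconds) :: rest => if unit == name then seconds else pvLookupUnit unit rest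

def get_number_of_seconds_alt (unit : String) : Int := pvLookupUnit unit pvUnitTable

-- ===== PRECONDITION & SPEC =====
def Spec_get_number_of_seconds (unit : String) (out : Int) : Prop := out = get_number_of_seconds_alt unit
instance (unit : String) (out : Int) : Decidable (Spec_get_number_of_seconds unit out) := by unfold Spec_get_number_of_seconds; infer_instance

-- ===== CLAIM (what is proved, stated in full; the proofs are below) =====
def Claim_equal_get_number_of_seconds : Prop := ∀ (unit : String), Dom_get_number_of_seconds unit → Spec_get_number_of_seconds unit (get_number_of_seconds unit)

-- ===== LEMMAS AND PROOFS =====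

-- ===== VERDICT (by name: the statement is the Claim_ definition above) =====
theorem get_number_of_seconds_spec : Claim_equal_get_number_of_seconds := by
  intro unit _
  unfold Spec_get_number_of_seconds get_number_of_seconds_alt pvUnitTable
  by_cases h1 : unit = "minute" <;> by_cases h2 : unit = "hour" <;>
    by_cases h3 : unit = "day" <;> by_cases h4 : unit = "week" <;>
    simp_all [get_number_of_seconds, pvLookupUnit]
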